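-- pv_equiv track=rewrite | github.com/bssrdf/pyleet | NumberofEqualCountSubstrings.py | equalCountSubstrings3
-- ===== SOURCE A (Python) =====
-- from collections import Counter
--
-- def equalCountSubstrings3(s: str, count: int) -> int:
--     # Sliding window
--     maxUnique = len(set(s))
--     ans = 0
--
--     for unique in range(1, maxUnique + 1):
--         windowSize = unique * count
--         lettersCount = Counter()
--         uniqueCount = 0
--         for i, c in enumerate(s):
--             lettersCount[c] += 1
--             if lettersCount[c] == count:
--                 uniqueCount += 1
--             if i >= windowSize:
--                 lettersCount[s[i - windowSize]] -= 1
--                 if lettersCount[s[i - windowSize]] == count - 1: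
--                     uniqueCount -= 1
--             ans += uniqueCount == unique
--
--     return ans
-- ===== SOURCE B (Python) =====
-- from collections import Counter
--
-- def equalCountSubstrings3(s: str, count: int) -> int:
--     # For each start index, extend rightward with a running counter and
--     # count the substrings in which every present character occurs `count` times.
--     n = len(s)
--     ans = 0
--     for a in range(n):
--         ctr = Counter()
--         for ch in s[a:]:
--             ctr[ch] += 1
--             if all(v == count for v in ctr.values()):
--                 ans += 1
--     return ans
-- ===== Notes on version B (the rewrite author's own statement) =====
-- stated objective: simpler
-- what changed: B drops A's one-sliding-window-per-unique-count scheme entirely: it enumerates substrings directly, growing a running counter from each start index and counting those where every value equals count.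
import Mathlib
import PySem

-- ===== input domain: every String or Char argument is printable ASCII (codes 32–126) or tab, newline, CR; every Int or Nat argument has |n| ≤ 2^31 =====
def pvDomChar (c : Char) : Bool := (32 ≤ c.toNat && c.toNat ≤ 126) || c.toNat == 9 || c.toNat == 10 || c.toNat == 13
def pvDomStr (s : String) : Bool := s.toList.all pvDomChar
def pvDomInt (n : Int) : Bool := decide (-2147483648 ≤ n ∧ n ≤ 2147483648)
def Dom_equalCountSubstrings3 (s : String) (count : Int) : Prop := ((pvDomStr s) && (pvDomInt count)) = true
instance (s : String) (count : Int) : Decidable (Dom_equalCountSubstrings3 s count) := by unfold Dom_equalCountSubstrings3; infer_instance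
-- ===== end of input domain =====

-- B replaces A's one-sliding-window-per-unique-count scheme by a direct quadratic
-- enumeration of substrings with a running counter (simpler; not faster).

-- ===== PORT A =====
def equalCountSubstrings3 (s : String) (count : Int) : Int :=
  let t := s.toList
  let maxUnique := (PySem.Set.ofList t).length
  let r := (PySem.List.pyRange 1 ((maxUnique : Int) + 1) 1).foldl
    (fun (acc : Option Int) unique =>
      match acc with
      | none => none
      | some ans =>
        let windowSize := unique * count
        let st := (PySem.List.enumerate t 0).foldl
          (fun (st : Option (PySem.Dict Char Int × Int × Int)) ic =>
            match st with
            | none => none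
            | some (d, uc, a) =>
              let d := d.modify ic.2 0 (· + 1)
              let uc := if d.getD ic.2 0 == count then uc + 1 else uc
              let rem : Option (PySem.Dict Char Int × Int) :=
                if ic.1 ≥ windowSize then
                  match PySem.List.pyGet? t (ic.1 - windowSize) with
                  | none => none
                  | some c' =>
                    let d2 := d.modify c' 0 (· - 1)
                    let uc2 := if d2.getD c' 0 == count - 1 then uc - 1 else uc
                    some (d2, uc2)
                else some (d, uc)
              match rem with
              | none => none
              | some (d2, uc2) => some (d2, uc2, a + (if uc2 == unique then 1 else 0)))
          (some (PySem.Dict.empty, 0, ans))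
        st.map (fun p => p.2.2))
    (some 0)
  r.getD 0

-- ===== PORT B =====
def equalCountSubstrings3_alt (s : String) (count : Int) : Int :=
  let t := s.toList
  let n := t.length
  (PySem.List.pyRange 0 (n : Int) 1).foldl
    (fun ans a =>
      ((PySem.List.slice t (some a) none).foldl
        (fun (st : PySem.Dict Char Int × Int) ch =>
          let d := st.1.modify ch 0 (· + 1)
          (d, st.2 + (if d.values.all (fun v => v == count) then 1 else 0)))
        (PySem.Dict.empty, ans)).2)
    0

-- ===== PRECONDITION & SPEC =====
-- Pre_ excludes exactly the inputs on which Python A raises IndexError: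
-- a negative count together with a nonempty string (negative window size
-- makes A index past the end of s).
def Pre_equalCountSubstrings3 (s : String) (count : Int) : Prop := s = "" ∨ 0 ≤ count
instance (s : String) (count : Int) : Decidable (Pre_equalCountSubstrings3 s count) := by unfold Pre_equalCountSubstrings3; infer_instance
def pvWitness_equalCountSubstrings3 : String × Int := ("aabb", 2)

def Spec_equalCountSubstrings3 (s : String) (count : Int) (out : Int) : Prop := out = equalCountSubstrings3_alt s count
instance (s : String) (count : Int) (out : Int) : Decidable (Spec_equalCountSubstrings3 s count out) := by unfold Spec_equalCountSubstrings3; infer_instance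

-- ===== CLAIM (what is proved, stated in full; the proofs are below) =====
def Claim_equal_equalCountSubstrings3 : Prop := ∀ (s : String) (count : Int), Dom_equalCountSubstrings3 s count → Pre_equalCountSubstrings3 s count → Spec_equalCountSubstrings3 s count (equalCountSubstrings3 s count)
-- ===== LEMMAS AND PROOFS =====

def pvCnt (k : Int) (l : List Char) : Int :=
  ∑ c ∈ l.toFinset, (if k ≤ (l.count c : Int) then (1:Int) else 0)

def pvChk (k : Int) (l : List Char) : Prop := ∀ c ∈ l, (l.count c : Int) = k

def pvSeg (t : List Char) (w m : ℕ) : List Char := (t.take m).drop (m - w)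

lemma pvCnt_sup (k : Int) (hk : 1 ≤ k) (l : List Char) (S : Finset Char) (hS : l.toFinset ⊆ S) :
    pvCnt k l = ∑ c ∈ S, (if k ≤ (l.count c : Int) then (1:Int) else 0) := by
  unfold pvCnt
  refine Finset.sum_subset hS ?_
  intro c _ hc
  have hc0 : l.count c = 0 := by
    rw [List.count_eq_zero]
    simpa using hc
  rw [hc0]
  norm_num
  omega

lemma pvCnt_add (k : Int) (hk : 1 ≤ k) (l : List Char) (x : Char) :
    pvCnt k (l ++ [x]) = pvCnt k l + (if ((l.count x : Int) + 1 = k) then 1 else 0) := by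
  set S := (l ++ [x]).toFinset with hSdef
  have hx : x ∈ S := by simp [hSdef]
  have h1 : pvCnt k (l ++ [x]) = ∑ c ∈ S, (if k ≤ ((l ++ [x]).count c : Int) then (1:Int) else 0) :=
    pvCnt_sup k hk _ S (by rfl)
  have h2 : pvCnt k l = ∑ c ∈ S, (if k ≤ (l.count c : Int) then (1:Int) else 0) :=
    pvCnt_sup k hk _ S (by simp [hSdef])
  have key : ∑ c ∈ S, ((if k ≤ ((l ++ [x]).count c : Int) then (1:Int) else 0)
      - (if k ≤ (l.count c : Int) then (1:Int) else 0))
      = (if k ≤ ((l ++ [x]).count x : Int) then (1:Int) else 0)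
      - (if k ≤ (l.count x : Int) then (1:Int) else 0) := by
    refine Finset.sum_eq_single_of_mem x hx ?_
    intro c _ hcx
    have : (l ++ [x]).count c = l.count c := by
      simp [List.count_append, List.count_singleton]
      exact fun h => hcx h.symm
    rw [this]; ring
  rw [Finset.sum_sub_distrib] at key
  rw [h1, h2]
  have hcx : (l ++ [x]).count x = l.count x + 1 := by
    simp [List.count_append]
  rw [hcx] at key
  push_cast at key ⊢
  have hnn : (0:Int) ≤ (l.count x : Int) := by positivity
  split_ifs at key ⊢ <;> omega

lemma pvCnt_perm (k : Int) (l l' : List Char) (h : l.Perm l') : pvCnt k l = pvCnt k l' := by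
  unfold pvCnt
  have hF : l.toFinset = l'.toFinset := by
    ext c; simp [List.Perm.mem_iff h]
  rw [hF]
  refine Finset.sum_congr rfl ?_
  intro c _
  rw [List.Perm.count_eq h]

lemma pvCnt_main (k : Int) (hk : 1 ≤ k) (z : List Char) (x y : Char) :
    pvCnt k (z ++ [x]) = pvCnt k (y :: z)
      + (if (((y :: z).count x : Int) + 1 = k) then 1 else 0)
      - (if (((z ++ [x]).count y : Int) = k - 1) then 1 else 0) := by
  by_cases hxy : x = y
  · subst hxy
    have hperm : pvCnt k (z ++ [x]) = pvCnt k (x :: z) :=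
      pvCnt_perm k _ _ (List.perm_append_singleton x z)
    rw [hperm]
    have h1 : (x :: z).count x = z.count x + 1 := by simp
    have h2 : (z ++ [x]).count x = z.count x + 1 := by simp [List.count_append]
    rw [h1, h2]
    push_cast
    split_ifs <;> omega
  · set S := (y :: (z ++ [x])).toFinset with hSdef
    have hxS : x ∈ S := by simp [hSdef]
    have hyS : y ∈ S := by simp [hSdef]
    have h1 : pvCnt k (z ++ [x]) = ∑ c ∈ S, (if k ≤ ((z ++ [x]).count c : Int) then (1:Int) else 0) :=
      pvCnt_sup k hk _ S (by intro c hc; simp [hSdef] at hc ⊢ ; tauto)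
    have h2 : pvCnt k (y :: z) = ∑ c ∈ S, (if k ≤ ((y :: z).count c : Int) then (1:Int) else 0) :=
      pvCnt_sup k hk _ S (by intro c hc; simp [hSdef] at hc ⊢ ; tauto)
    have c1 : (z ++ [x]).count x = z.count x + 1 := by simp [List.count_append]
    have c2 : (y :: z).count x = z.count x := by
      simp [Ne.symm hxy]
    have c3 : (z ++ [x]).count y = z.count y := by
      simp [List.count_append, hxy]
    have c4 : (y :: z).count y = z.count y + 1 := by simp
    have key : (∑ c ∈ S, (if k ≤ ((z ++ [x]).count c : Int) then (1:Int) else 0))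
        - (∑ c ∈ S, (if k ≤ ((y :: z).count c : Int) then (1:Int) else 0))
        = ((if k ≤ ((z ++ [x]).count x : Int) then (1:Int) else 0)
            - (if k ≤ ((y :: z).count x : Int) then (1:Int) else 0))
          + ((if k ≤ ((z ++ [x]).count y : Int) then (1:Int) else 0)
            - (if k ≤ ((y :: z).count y : Int) then (1:Int) else 0)) := by
      rw [← Finset.sum_sub_distrib]
      rw [← Finset.add_sum_erase S _ hxS]
      congr 1
      refine Finset.sum_eq_single_of_mem y (Finset.mem_erase.mpr ⟨fun h => hxy h.symm, hyS⟩) ?_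
      intro c hc hcy
      have hcx : c ≠ x := (Finset.mem_erase.mp hc).1
      have e1 : (z ++ [x]).count c = z.count c := by
        simp [List.count_append, Ne.symm hcx]
      have e2 : (y :: z).count c = z.count c := by
        simp [Ne.symm hcy]
      rw [e1, e2]; ring
    rw [h1, h2, c2, c3]
    rw [c1, c2, c3, c4] at key
    set A := (∑ c ∈ S, (if k ≤ ((z ++ [x]).count c : Int) then (1:Int) else 0)) with hA
    set B := (∑ c ∈ S, (if k ≤ ((y :: z).count c : Int) then (1:Int) else 0)) with hB
    push_cast at key ⊢
    split_ifs at key ⊢ <;> omega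

lemma pvChk_length (k : Int) (K : ℕ) (hKk : (K:Int) = k) (l : List Char) (h : pvChk k l) :
    l.length = l.toFinset.card * K := by
  have h1 : ∑ c ∈ l.toFinset, l.count c = l.length := List.sum_toFinset_count_eq_length l
  have h2 : ∀ c ∈ l.toFinset, l.count c = K := by
    intro c hc
    have := h c (List.mem_toFinset.mp hc)
    rw [← hKk] at this
    exact_mod_cast this
  rw [← h1, Finset.sum_congr rfl h2, Finset.sum_const, smul_eq_mul, mul_comm]

lemma pvCnt_eq_iff (K u : ℕ) (_hK : 1 ≤ K) (l : List Char) (hlen : l.length ≤ u * K) :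
    pvCnt (K:Int) l = (u:Int) ↔ (pvChk (K:Int) l ∧ l.toFinset.card = u) := by
  constructor
  · intro h
    set P := l.toFinset.filter (fun c => (K:Int) ≤ (l.count c : Int)) with hP
    have hpc : pvCnt (K:Int) l = (P.card : Int) := by
      unfold pvCnt
      rw [Finset.sum_boole]
    have hcard : P.card = u := by
      rw [hpc] at h; exact_mod_cast h
    have hsub : P ⊆ l.toFinset := Finset.filter_subset _ _
    have hlenF : ∑ c ∈ l.toFinset, l.count c = l.length := List.sum_toFinset_count_eq_length l
    have hgeP : ∀ c ∈ P, K ≤ l.count c := by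
      intro c hc
      rw [hP] at hc
      have := (Finset.mem_filter.mp hc).2
      exact_mod_cast this
    have hPBound : u * K ≤ ∑ c ∈ P, l.count c := by
      have := Finset.card_nsmul_le_sum P (fun c => l.count c) K hgeP
      rw [smul_eq_mul, hcard] at this
      exact this
    have hmono : ∑ c ∈ P, l.count c ≤ ∑ c ∈ l.toFinset, l.count c :=
      Finset.sum_le_sum_of_subset hsub
    have heq1 : ∑ c ∈ P, l.count c = u * K := by omega
    have heqF : ∑ c ∈ l.toFinset, l.count c = ∑ c ∈ P, l.count c := by omega
    have hFP : l.toFinset = P := by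
      by_contra hne
      have hss : P ⊂ l.toFinset := hsub.ssubset_of_ne (fun he => hne he.symm)
      obtain ⟨c0, hc0F, hc0P⟩ := Finset.exists_of_ssubset hss
      have hpos : 0 < l.count c0 := List.count_pos_iff.mpr (List.mem_toFinset.mp hc0F)
      have hins : insert c0 P ⊆ l.toFinset := by
        intro c hc
        rcases Finset.mem_insert.mp hc with rfl | hc
        · exact hc0F
        · exact hsub hc
      have hins2 : (∑ c ∈ insert c0 P, l.count c) ≤ ∑ c ∈ l.toFinset, l.count c :=
        Finset.sum_le_sum_of_subset hins
      rw [Finset.sum_insert hc0P] at hins2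
      omega
    have hcnt : ∀ c ∈ P, l.count c = K := by
      intro c0 hc0
      by_contra hne
      have hlt : K < l.count c0 := lt_of_le_of_ne (hgeP c0 hc0) (fun he => hne he.symm)
      have hlt2 : (∑ _c ∈ P, K) < ∑ c ∈ P, l.count c :=
        Finset.sum_lt_sum (fun i hi => hgeP i hi) ⟨c0, hc0, hlt⟩
      rw [Finset.sum_const, smul_eq_mul, hcard] at hlt2
      omega
    refine ⟨?_, by rw [hFP]; exact hcard⟩
    intro c hc
    have hcP : c ∈ P := hFP ▸ List.mem_toFinset.mpr hc
    rw [hcnt c hcP]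
  · rintro ⟨hchk, hcard⟩
    unfold pvCnt
    have : ∀ c ∈ l.toFinset, (if (K:Int) ≤ (l.count c : Int) then (1:Int) else 0) = 1 := by
      intro c hc
      rw [hchk c (List.mem_toFinset.mp hc)]
      simp
    rw [Finset.sum_congr rfl this, Finset.sum_const, hcard]
    simp

lemma pvSeg_zero (t : List Char) (w : ℕ) : pvSeg t w 0 = [] := by
  unfold pvSeg
  rw [List.take_zero]
  exact List.drop_nil

lemma pvSeg_succ_lt (t : List Char) (w m : ℕ) (hm : m < w) (hmn : m < t.length) :
    pvSeg t w (m+1) = pvSeg t w m ++ [t[m]] := by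
  unfold pvSeg
  rw [Nat.sub_eq_zero_of_le (by omega), Nat.sub_eq_zero_of_le (by omega)]
  rw [List.drop_zero, List.drop_zero, List.take_succ_eq_append_getElem hmn]

lemma pvSeg_head (t : List Char) (w m : ℕ) (hw : 1 ≤ w) (hwm : w ≤ m) (_hmn : m ≤ t.length)
    (h : m - w < t.length) :
    pvSeg t w m = t[m-w] :: (t.take m).drop (m - w + 1) := by
  unfold pvSeg
  rw [List.drop_eq_getElem_cons (by simp; omega)]
  congr 1
  exact List.getElem_take

lemma pvSeg_succ_ge (t : List Char) (w m : ℕ) (hw : 1 ≤ w) (hwm : w ≤ m) (hmn : m < t.length) :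
    pvSeg t w (m+1) = (t.take m).drop (m - w + 1) ++ [t[m]] := by
  unfold pvSeg
  rw [show m + 1 - w = (m - w) + 1 by omega]
  rw [List.take_succ_eq_append_getElem hmn, List.drop_append]
  congr 1
  have h0 : m - w + 1 - (t.take m).length = 0 := by simp; omega
  rw [h0]
  exact List.drop_zero

lemma pvSeg_length (t : List Char) (w m : ℕ) (hm : m ≤ t.length) :
    (pvSeg t w m).length = m - (m - w) := by
  unfold pvSeg
  simp
  omega

def pvStepA (t : List Char) (count unique : Int)
    (st : Option (PySem.Dict Char Int × Int × Int)) (ic : Int × Char) :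
    Option (PySem.Dict Char Int × Int × Int) :=
  match st with
  | none => none
  | some (d, uc, a) =>
    let d := d.modify ic.2 0 (· + 1)
    let uc := if d.getD ic.2 0 == count then uc + 1 else uc
    let rem : Option (PySem.Dict Char Int × Int) :=
      if ic.1 ≥ unique * count then
        match PySem.List.pyGet? t (ic.1 - unique * count) with
        | none => none
        | some c' =>
          let d2 := d.modify c' 0 (· - 1)
          let uc2 := if d2.getD c' 0 == count - 1 then uc - 1 else uc
          some (d2, uc2)
      else some (d, uc)
    match rem with
    | none => none
    | some (d2, uc2) => some (d2, uc2, a + (if uc2 == unique then 1 else 0))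

lemma pvCnt_nil (k : Int) : pvCnt k [] = 0 := by simp [pvCnt]

lemma pvSeg_w0 (t : List Char) (m : ℕ) : pvSeg t 0 m = [] := by
  unfold pvSeg
  apply List.drop_eq_nil_of_le
  simp

lemma pvCount_shift (z : List Char) (x y c : Char) :
    (((z ++ [x]).count c : ℕ) : Int)
      = (((y :: z).count c : ℕ) : Int) + (if c = x then 1 else 0) - (if c = y then 1 else 0) := by
  have h1 : (z ++ [x]).count c = z.count c + (if c = x then 1 else 0) := by
    rw [List.count_append]
    by_cases hcx : c = x
    · subst hcx; simp
    · simp [List.count_eq_zero.mpr (by simp [hcx] : c ∉ [x]), hcx]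
  have h2 : (y :: z).count c = z.count c + (if c = y then 1 else 0) := by
    by_cases hcy : c = y
    · subst hcy; simp
    · simp [List.count_cons, hcy]
      intro h
      exact absurd h.symm hcy
  rw [h1, h2]
  split_ifs <;> push_cast <;> ring

lemma pvA_inner (t : List Char) (k u : Int) (hk : 0 ≤ k) (hu : 1 ≤ u) :
    ∀ (l : List Char) (m : ℕ) (d : PySem.Dict Char Int) (ans : Int),
    t.drop m = l →
    (∀ c, d.getD c 0 = (((pvSeg t (u*k).toNat m).count c : ℕ) : Int)) →
    ∃ st : PySem.Dict Char Int × Int × Int,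
      (PySem.List.enumerate l (m:Int)).foldl (pvStepA t k u)
        (some (d, pvCnt k (pvSeg t (u*k).toNat m), ans)) = some st ∧
      st.2.2 = ans + ∑ j ∈ Finset.range l.length,
        (if pvCnt k (pvSeg t (u*k).toNat (m+j+1)) = u then (1:Int) else 0) := by
  intro l
  induction l with
  | nil =>
    intro m d ans _ _
    refine ⟨(d, pvCnt k (pvSeg t (u*k).toNat m), ans), ?_, ?_⟩
    · simp [PySem.List.enumerate]
    · simp
  | cons x l' ih =>
    intro m d ans hdrop hd
    set w := (u*k).toNat with hwdef
    have hwcast : (w:Int) = u*k := Int.toNat_of_nonneg (mul_nonneg (by omega) hk)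
    have hmn : m < t.length := by
      by_contra hle
      rw [List.drop_eq_nil_of_le (by omega)] at hdrop
      exact absurd hdrop (by simp)
    have hx : t[m] = x := by
      have h0 : (t.drop m)[0]'(by rw [hdrop]; simp) = x := by
        simp [hdrop]
      rw [List.getElem_drop] at h0
      simpa using h0
    have hdrop' : t.drop (m+1) = l' := by
      have := congrArg List.tail hdrop
      rw [List.tail_drop] at this
      simpa using this
    rw [PySem.List.enumerate_cons, List.foldl_cons]
    have hcast1 : ((m:Int)+1) = (((m+1 : ℕ)) : Int) := by push_cast; rfl
    by_cases hge : ((m:Int) ≥ u*k)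
    · -- removal branch
      have hwm : w ≤ m := by omega
      have hidx : ((m:Int) - u*k) = (((m-w : ℕ)) : Int) := by omega
      have hidxlt : m - w < t.length := by omega
      have hget : PySem.List.pyGet? t ((m:Int) - u*k) = some t[m-w] := by
        rw [hidx]
        simp [hidxlt]
      by_cases hw0 : w = 0
      · -- k must be 0, window always empty
        have hk0 : k = 0 := by
          by_contra hne
          have hk1 : 1 ≤ k := by omega
          nlinarith [hwcast]
        have hseg0 : ∀ m' : ℕ, pvSeg t w m' = [] := by
          intro m'; rw [hw0]; exact pvSeg_w0 t m'
        have hy : t[m-w] = x := by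
          simp only [hw0, Nat.sub_zero]
          exact hx
        have hdx : d.getD x 0 = 0 := by
          rw [hd x, hseg0]
          simp
        have hstep : pvStepA t k u (some (d, pvCnt k (pvSeg t w m), ans)) ((m:Int), x)
            = some ((d.modify x 0 (· + 1)).modify x 0 (· - 1), pvCnt k (pvSeg t w (m+1)),
                ans + (if pvCnt k (pvSeg t w (m+1)) = u then (1:Int) else 0)) := by
          simp only [pvStepA, ge_iff_le, hge, if_true, hget, hy,
            PySem.Dict.getD_modify_self, hdx, beq_iff_eq]
          rw [hseg0 m, hseg0 (m+1), pvCnt_nil]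
          norm_num [hk0]
        rw [hstep]
        rw [hcast1]
        obtain ⟨st, hfold, hsum⟩ := ih (m+1) ((d.modify x 0 (· + 1)).modify x 0 (· - 1))
          (ans + (if pvCnt k (pvSeg t w (m+1)) = u then (1:Int) else 0)) hdrop'
          (by
            intro c
            simp only [PySem.Dict.getD_modify, hd, hseg0]
            split_ifs with h1 <;> simp)
        refine ⟨st, hfold, ?_⟩
        rw [hsum]
        simp only [List.length_cons]
        rw [Finset.sum_range_succ' _ l'.length]
        simp only [Nat.add_zero]
        have hj : ∀ j, m + 1 + j + 1 = m + (j+1) + 1 := by omega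
        rw [Finset.sum_congr rfl (fun j _ => by rw [hj j])]
        ring
      · -- w ≥ 1, real sliding window step
        have hw1 : 1 ≤ w := by omega
        have hk1 : 1 ≤ k := by
          by_contra hne
          have hke : k = 0 := by omega
          rw [hke] at hwcast
          simp at hwcast
          omega
        set y := t[m-w] with hydef
        set z := (t.take m).drop (m - w + 1) with hzdef
        have hsegm : pvSeg t w m = y :: z := pvSeg_head t w m hw1 hwm (by omega) hidxlt
        have hsegm1 : pvSeg t w (m+1) = z ++ [x] := by
          rw [← hx]
          exact pvSeg_succ_ge t w m hw1 hwm hmn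
        have hvy : (if y = x then ((((y :: z).count x : ℕ) : Int) + 1) else (((y :: z).count y : ℕ) : Int)) - 1
            = (((z ++ [x]).count y : ℕ) : Int) := by
          rw [pvCount_shift z x y y]
          by_cases hyx : y = x
          · rw [if_pos hyx, if_pos rfl, hyx]
            simp
          · rw [if_neg hyx, if_neg (fun h => hyx h), if_pos rfl]
            ring
        have hstep : pvStepA t k u (some (d, pvCnt k (pvSeg t w m), ans)) ((m:Int), x)
            = some ((d.modify x 0 (· + 1)).modify y 0 (· - 1), pvCnt k (pvSeg t w (m+1)),
                ans + (if pvCnt k (pvSeg t w (m+1)) = u then (1:Int) else 0)) := by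
          simp only [pvStepA, ge_iff_le, hge, if_true, hget,
            PySem.Dict.getD_modify_self, PySem.Dict.getD_modify, hd, beq_iff_eq]
          rw [hsegm, hsegm1]
          rw [hvy]
          rw [pvCnt_main k hk1 z x y]
          have e : (if (((z ++ [x]).count y : ℕ) : Int) = k - 1 then
                (if (((y :: z).count x : ℕ) : Int) + 1 = k then pvCnt k (y :: z) + 1 else pvCnt k (y :: z)) - 1
              else (if (((y :: z).count x : ℕ) : Int) + 1 = k then pvCnt k (y :: z) + 1 else pvCnt k (y :: z)))
              = (pvCnt k (y :: z) + (if (((y :: z).count x : ℕ) : Int) + 1 = k then (1:Int) else 0))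
                - (if (((z ++ [x]).count y : ℕ) : Int) = k - 1 then (1:Int) else 0) := by
            split_ifs <;> ring
          rw [e]
        rw [hstep, hcast1]
        obtain ⟨st, hfold, hsum⟩ := ih (m+1) ((d.modify x 0 (· + 1)).modify y 0 (· - 1))
          (ans + (if pvCnt k (pvSeg t w (m+1)) = u then (1:Int) else 0)) hdrop'
          (by
            intro c
            simp only [PySem.Dict.getD_modify, hd, hsegm, hsegm1]
            rw [pvCount_shift z x y c]
            by_cases hcy : c = y <;> by_cases hcx : c = x
            · have hyx : y = x := by rw [← hcy, hcx]
              rw [if_pos hcy, if_pos hyx, if_pos hcx, if_pos hcy]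
              rw [hcy, hyx]
            · have hyx : ¬ y = x := by rw [← hcy]; exact hcx
              rw [if_pos hcy, if_neg hyx, if_neg hcx, if_pos hcy]
              rw [hcy]
              ring
            · rw [if_neg hcy, if_pos hcx, if_pos hcx, if_neg hcy]
              rw [hcx]
              ring
            · rw [if_neg hcy, if_neg hcx, if_neg hcx, if_neg hcy]
              ring)
        refine ⟨st, hfold, ?_⟩
        rw [hsum]
        simp only [List.length_cons]
        rw [Finset.sum_range_succ' _ l'.length]
        simp only [Nat.add_zero]
        have hj : ∀ j, m + 1 + j + 1 = m + (j+1) + 1 := by omega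
        rw [Finset.sum_congr rfl (fun j _ => by rw [hj j])]
        ring
    · -- no removal: m < w
      have hmw : m < w := by omega
      have hk1 : 1 ≤ k := by
        by_contra hne
        have hke : k = 0 := by omega
        rw [hke] at hwcast
        simp at hwcast
        omega
      have hsegm1 : pvSeg t w (m+1) = pvSeg t w m ++ [x] := by
        rw [← hx]
        exact pvSeg_succ_lt t w m hmw hmn
      have hstep : pvStepA t k u (some (d, pvCnt k (pvSeg t w m), ans)) ((m:Int), x)
          = some (d.modify x 0 (· + 1), pvCnt k (pvSeg t w (m+1)),
              ans + (if pvCnt k (pvSeg t w (m+1)) = u then (1:Int) else 0)) := by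
        simp only [pvStepA, ge_iff_le, hge, if_false,
          PySem.Dict.getD_modify_self, hd, beq_iff_eq]
        rw [hsegm1, pvCnt_add k hk1 (pvSeg t w m) x]
        have e : (if (((pvSeg t w m).count x : ℕ) : Int) + 1 = k then pvCnt k (pvSeg t w m) + 1 else pvCnt k (pvSeg t w m))
            = pvCnt k (pvSeg t w m) + (if (((pvSeg t w m).count x : ℕ) : Int) + 1 = k then (1:Int) else 0) := by
          split_ifs <;> ring
        rw [e]
      rw [hstep, hcast1]
      obtain ⟨st, hfold, hsum⟩ := ih (m+1) (d.modify x 0 (· + 1))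
        (ans + (if pvCnt k (pvSeg t w (m+1)) = u then (1:Int) else 0)) hdrop'
        (by
          intro c
          simp only [PySem.Dict.getD_modify, hd, hsegm1]
          have h1 : ((pvSeg t w m ++ [x]).count c : ℕ) = (pvSeg t w m).count c + (if c = x then 1 else 0) := by
            rw [List.count_append]
            by_cases hcx : c = x
            · subst hcx; simp
            · simp [List.count_eq_zero.mpr (by simp [hcx] : c ∉ [x]), hcx]
          rw [h1]
          by_cases hcx : c = x
          · rw [if_pos hcx, if_pos hcx, hcx]
            push_cast
            ring
          · rw [if_neg hcx, if_neg hcx]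
            push_cast
            ring)
      refine ⟨st, hfold, ?_⟩
      rw [hsum]
      simp only [List.length_cons]
      rw [Finset.sum_range_succ' _ l'.length]
      simp only [Nat.add_zero]
      have hj : ∀ j, m + 1 + j + 1 = m + (j+1) + 1 := by omega
      rw [Finset.sum_congr rfl (fun j _ => by rw [hj j])]
      ring

def pvSU (t : List Char) (count u : Int) : Int :=
  ∑ i ∈ Finset.range t.length, (if pvCnt count (pvSeg t (u*count).toNat (i+1)) = u then (1:Int) else 0)

def pvOuterA (t : List Char) (count : Int) (acc : Option Int) (unique : Int) : Option Int :=
  match acc with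
  | none => none
  | some ans =>
    ((PySem.List.enumerate t 0).foldl (pvStepA t count unique)
      (some (PySem.Dict.empty, 0, ans))).map (fun p => p.2.2)

lemma pvA_perU (t : List Char) (k : Int) (hk : 0 ≤ k) (u : Int) (hu : 1 ≤ u) (ans : Int) :
    pvOuterA t k (some ans) u = some (ans + pvSU t k u) := by
  obtain ⟨st, hfold, hsum⟩ := pvA_inner t k u hk hu t 0 PySem.Dict.empty ans rfl
    (by intro c; rw [pvSeg_zero]; simp [PySem.Dict.getD_empty])
  have hred : pvOuterA t k (some ans) u
      = ((PySem.List.enumerate t 0).foldl (pvStepA t k u)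
          (some (PySem.Dict.empty, 0, ans))).map (fun p => p.2.2) := rfl
  rw [hred]
  have h0 : pvCnt k (pvSeg t (u*k).toNat 0) = 0 := by rw [pvSeg_zero, pvCnt_nil]
  rw [show ((0:ℕ):Int) = (0:Int) by norm_num, h0] at hfold
  rw [hfold]
  simp only [Option.map_some]
  congr 1
  rw [hsum]
  unfold pvSU
  congr 1
  refine Finset.sum_congr rfl ?_
  intro j _
  rw [Nat.zero_add]

lemma pvA_list (t : List Char) (k : Int) (hk : 0 ≤ k) :
    ∀ (us : List Int), (∀ u ∈ us, 1 ≤ u) → ∀ ans : Int,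
    us.foldl (pvOuterA t k) (some ans) = some (ans + (us.map (pvSU t k)).sum) := by
  intro us
  induction us with
  | nil => intro _ ans; simp
  | cons u us ih =>
    intro hmem ans
    rw [List.foldl_cons, pvA_perU t k hk u (hmem u (by simp)) ans]
    rw [ih (fun v hv => hmem v (by simp [hv])) (ans + pvSU t k u)]
    simp [List.map_cons, List.sum_cons]
    ring

def pvStepB (count : Int) (st : PySem.Dict Char Int × Int) (ch : Char) :
    PySem.Dict Char Int × Int :=
  let d := st.1.modify ch 0 (· + 1)
  (d, st.2 + (if d.values.all (fun v => v == count) then 1 else 0))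

def pvChkB (count : Int) (q : List Char) : Bool :=
  (PySem.Dict.counter q).values.all (fun v => v == count)

lemma pvB_inner (k : Int) :
    ∀ (l p : List Char) (ans : Int),
    (l.foldl (pvStepB k) (PySem.Dict.counter p, ans)).2
      = ans + ∑ j ∈ Finset.range l.length, (if pvChkB k (p ++ l.take (j+1)) = true then (1:Int) else 0) := by
  intro l
  induction l with
  | nil => intro p ans; simp
  | cons ch l' ih =>
    intro p ans
    rw [List.foldl_cons]
    have hstep : pvStepB k (PySem.Dict.counter p, ans) ch
        = (PySem.Dict.counter (p ++ [ch]),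
            ans + (if pvChkB k (p ++ [ch]) = true then (1:Int) else 0)) := by
      unfold pvStepB pvChkB
      rw [← PySem.Dict.counter_append_singleton]
    rw [hstep, ih (p ++ [ch])]
    simp only [List.length_cons]
    rw [Finset.sum_range_succ' _ l'.length]
    have harg : ∀ j, (p ++ [ch]) ++ l'.take (j+1) = p ++ (ch :: l').take (j+1+1) := by
      intro j
      rw [List.take_succ_cons, List.append_assoc]
      rfl
    rw [Finset.sum_congr rfl (fun j _ => by rw [harg j])]
    have h0 : p ++ (ch :: l').take (0+1) = p ++ [ch] := by simp
    rw [h0]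
    ring

lemma pvChkB_iff (k : Int) (q : List Char) : pvChkB k q = true ↔ pvChk k q := by
  unfold pvChkB pvChk
  rw [PySem.Dict.values_eq_map_keys _ (PySem.Dict.nodup_keys_counter q) 0]
  rw [List.all_map, List.all_eq_true]
  constructor
  · intro h c hc
    have hmem : c ∈ (PySem.Dict.counter q).keys := by
      rw [PySem.Dict.keys_counter]
      rw [← PySem.List.dedup_eq_ofList, PySem.List.mem_dedup]
      exact hc
    have := h c hmem
    simp only [Function.comp] at this
    rw [PySem.Dict.getD_counter] at this
    exact beq_iff_eq.mp this
  · intro h c hc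
    have hcq : c ∈ q := by
      rw [PySem.Dict.keys_counter, ← PySem.List.dedup_eq_ofList, PySem.List.mem_dedup] at hc
      exact hc
    simp [Function.comp, PySem.Dict.getD_counter, h c hcq]

def pvOuterB (t : List Char) (count : Int) (ans a : Int) : Int :=
  ((PySem.List.slice t (some a) none).foldl (pvStepB count) (PySem.Dict.empty, ans)).2

lemma pvB_perA (t : List Char) (k : Int) (a : ℕ) (ans : Int) :
    pvOuterB t k ans ((a:ℕ):Int)
      = ans + ∑ j ∈ Finset.range (t.length - a), (if pvChkB k ((t.drop a).take (j+1)) = true then (1:Int) else 0) := by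
  unfold pvOuterB
  rw [PySem.List.slice_from_natCast]
  have hcnt : (PySem.Dict.empty : PySem.Dict Char Int) = PySem.Dict.counter ([] : List Char) := rfl
  rw [hcnt, pvB_inner k (t.drop a) [] ans]
  rw [List.length_drop]
  refine congrArg (fun s => ans + s) ?_
  refine Finset.sum_congr rfl ?_
  intro j _
  rw [List.nil_append]

lemma pvB_list (t : List Char) (k : Int) :
    ∀ (as : List ℕ) (ans : Int),
    ((as.map (fun a => ((a:ℕ):Int))).foldl (pvOuterB t k) ans)
      = ans + (as.map (fun a => ∑ j ∈ Finset.range (t.length - a),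
          (if pvChkB k ((t.drop a).take (j+1)) = true then (1:Int) else 0))).sum := by
  intro as
  induction as with
  | nil => intro ans; simp
  | cons a as ih =>
    intro ans
    rw [List.map_cons, List.foldl_cons, pvB_perA t k a ans, ih]
    simp [List.map_cons, List.sum_cons]
    ring

def pvSA (t : List Char) (K : ℕ) : Finset (ℕ × ℕ) :=
  (Finset.range t.toFinset.card ×ˢ Finset.range t.length).filter
    (fun p => pvCnt (K:Int) (pvSeg t ((p.1+1)*K) (p.2+1)) = (((p.1+1:ℕ)):Int))

def pvSP (t : List Char) (K : ℕ) : Finset (ℕ × ℕ) :=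
  (Finset.range t.length ×ˢ Finset.range t.length).filter
    (fun p => p.1 ≤ p.2 ∧ ∀ c ∈ (t.take (p.2+1)).drop p.1,
      ((((t.take (p.2+1)).drop p.1).count c : ℕ) : Int) = (K:Int))

lemma pvSub_toFinset (t : List Char) (a b : ℕ) :
    ((t.take b).drop a).toFinset ⊆ t.toFinset := by
  intro c hc
  rw [List.mem_toFinset] at hc ⊢
  exact List.mem_of_mem_take (List.mem_of_mem_drop hc)

lemma pvSub_length (t : List Char) (a b : ℕ) (hb : b < t.length) :
    ((t.take (b+1)).drop a).length = b + 1 - a := by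
  rw [List.length_drop, List.length_take]
  omega

lemma pvSA_mem (t : List Char) (K : ℕ) (hK : 1 ≤ K) (j i : ℕ)
    (h : (j, i) ∈ pvSA t K) :
    i < t.length ∧ (j+1)*K ≤ i + 1 ∧
    pvChk (K:Int) ((t.take (i+1)).drop (i+1-(j+1)*K)) ∧
    ((t.take (i+1)).drop (i+1-(j+1)*K)).toFinset.card = j+1 := by
  rw [pvSA, Finset.mem_filter, Finset.mem_product, Finset.mem_range, Finset.mem_range] at h
  obtain ⟨⟨hj, hi⟩, hcond⟩ := h
  have hlen : (pvSeg t ((j+1)*K) (i+1)).length = (i+1) - ((i+1) - (j+1)*K) :=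
    pvSeg_length t _ _ (by omega)
  have hiff := pvCnt_eq_iff K (j+1) hK (pvSeg t ((j+1)*K) (i+1)) (by omega)
  obtain ⟨hchk, hcard⟩ := hiff.mp hcond
  have hlen2 : (pvSeg t ((j+1)*K) (i+1)).length = ((pvSeg t ((j+1)*K) (i+1)).toFinset.card) * K :=
    pvChk_length (K:Int) K rfl _ hchk
  rw [hcard] at hlen2
  have hw : (j+1)*K ≤ i + 1 := by omega
  refine ⟨hi, hw, ?_, ?_⟩
  · exact hchk
  · exact hcard

lemma pvSP_mem (t : List Char) (K : ℕ) (_hK : 1 ≤ K) (a b : ℕ)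
    (h : (a, b) ∈ pvSP t K) :
    a < t.length ∧ b < t.length ∧ a ≤ b ∧
    pvChk (K:Int) ((t.take (b+1)).drop a) ∧
    1 ≤ ((t.take (b+1)).drop a).toFinset.card ∧
    ((t.take (b+1)).drop a).toFinset.card ≤ t.toFinset.card ∧
    ((t.take (b+1)).drop a).toFinset.card * K = b + 1 - a := by
  rw [pvSP, Finset.mem_filter, Finset.mem_product, Finset.mem_range, Finset.mem_range] at h
  obtain ⟨⟨ha, hb⟩, hab, hchk⟩ := h
  have hlen : ((t.take (b+1)).drop a).length = b + 1 - a := pvSub_length t a b hb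
  have hne : (t.take (b+1)).drop a ≠ [] := by
    intro he
    rw [he] at hlen
    simp at hlen
    omega
  have hpos : 1 ≤ ((t.take (b+1)).drop a).toFinset.card :=
    Finset.card_pos.mpr ((List.toFinset_nonempty_iff _).mpr hne)
  have hle : ((t.take (b+1)).drop a).toFinset.card ≤ t.toFinset.card :=
    Finset.card_le_card (pvSub_toFinset t a (b+1))
  have hlen2 : ((t.take (b+1)).drop a).length = ((t.take (b+1)).drop a).toFinset.card * K :=
    pvChk_length (K:Int) K rfl _ hchk
  exact ⟨ha, hb, hab, hchk, hpos, hle, by omega⟩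

lemma pvSA_card_eq (t : List Char) (K : ℕ) (hK : 1 ≤ K) :
    (pvSA t K).card = (pvSP t K).card := by
  refine Finset.card_bij' (fun p _ => (p.2 + 1 - (p.1+1)*K, p.2))
    (fun q _ => (((t.take (q.2+1)).drop q.1).toFinset.card - 1, q.2)) ?_ ?_ ?_ ?_
  · -- forward membership
    rintro ⟨j, i⟩ h
    dsimp only
    obtain ⟨hi, hw, hchk, hcard⟩ := pvSA_mem t K hK j i h
    rw [pvSP, Finset.mem_filter, Finset.mem_product, Finset.mem_range, Finset.mem_range]
    have hKw : 1 ≤ (j+1)*K := by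
      have := Nat.mul_le_mul (show 1 ≤ j+1 by omega) hK
      omega
    exact ⟨⟨by omega, hi⟩, by omega, hchk⟩
  · -- backward membership
    rintro ⟨a, b⟩ h
    dsimp only
    obtain ⟨ha, hb, hab, hchk, hpos, hle, hlen⟩ := pvSP_mem t K hK a b h
    rw [pvSA, Finset.mem_filter, Finset.mem_product, Finset.mem_range, Finset.mem_range]
    set d := ((t.take (b+1)).drop a).toFinset.card with hd
    have hd1 : d - 1 + 1 = d := by omega
    have hsub : pvSeg t ((d-1+1)*K) (b+1) = (t.take (b+1)).drop a := by
      unfold pvSeg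
      congr 1
      rw [hd1]
      omega
    refine ⟨⟨by omega, hb⟩, ?_⟩
    dsimp only
    rw [hsub]
    have hlen3 : ((t.take (b+1)).drop a).length = b + 1 - a := pvSub_length t a b hb
    refine (pvCnt_eq_iff K (d-1+1) hK _ ?_).mpr ⟨hchk, by omega⟩
    rw [hd1]
    omega
  · rintro ⟨j, i⟩ h
    dsimp only
    obtain ⟨hi, hw, hchk, hcard⟩ := pvSA_mem t K hK j i h
    rw [hcard]
    norm_num
  · rintro ⟨a, b⟩ h
    dsimp only
    obtain ⟨ha, hb, hab, hchk, hpos, hle, hlen⟩ := pvSP_mem t K hK a b h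
    set d := ((t.take (b+1)).drop a).toFinset.card with hd
    have hd1 : d - 1 + 1 = d := by omega
    rw [hd1]
    congr 1
    omega

lemma pvListSum (U : ℕ) (f : ℕ → Int) : ((List.range U).map f).sum = ∑ j ∈ Finset.range U, f j := rfl

lemma pvU_eq (t : List Char) : (PySem.Set.ofList t).length = t.toFinset.card := by
  rw [← PySem.List.dedup_eq_ofList]
  have hnd : (PySem.List.dedup t).Nodup := PySem.List.nodup_dedup t
  have hfs : (PySem.List.dedup t).toFinset = t.toFinset := by
    ext c
    simp
  rw [← hfs, List.toFinset_card_of_nodup hnd]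

lemma pvA_sum_eq_card (t : List Char) (K : ℕ) :
    (∑ j ∈ Finset.range t.toFinset.card, pvSU t (K:Int) (((j+1:ℕ)):Int)) = ((pvSA t K).card : Int) := by
  have hsu : ∀ j : ℕ, pvSU t (K:Int) (((j+1:ℕ)):Int)
      = ∑ i ∈ Finset.range t.length,
          (if pvCnt (K:Int) (pvSeg t ((j+1)*K) (i+1)) = (((j+1:ℕ)):Int) then (1:Int) else 0) := by
    intro j
    unfold pvSU
    have hw : ((((j+1:ℕ)):Int) * (K:Int)).toNat = (j+1)*K := by
      rw [← Nat.cast_mul, Int.toNat_natCast]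
    rw [hw]
  rw [Finset.sum_congr rfl (fun j _ => hsu j)]
  rw [← Finset.sum_product']
  rw [Finset.sum_boole]
  rfl

lemma pvB_sum_eq_card (t : List Char) (K : ℕ) :
    (∑ a ∈ Finset.range t.length, ∑ j ∈ Finset.range (t.length - a),
      (if pvChkB (K:Int) ((t.drop a).take (j+1)) = true then (1:Int) else 0))
    = ((pvSP t K).card : Int) := by
  have hstep1 : ∀ a ∈ Finset.range t.length,
      (∑ j ∈ Finset.range (t.length - a),
        (if pvChkB (K:Int) ((t.drop a).take (j+1)) = true then (1:Int) else 0))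
      = ∑ b ∈ Finset.range t.length,
          (if (a ≤ b ∧ ∀ c ∈ (t.take (b+1)).drop a, ((((t.take (b+1)).drop a).count c : ℕ) : Int) = (K:Int)) then (1:Int) else 0) := by
    intro a ha
    rw [Finset.mem_range] at ha
    have h2 : (∑ b ∈ Finset.range t.length,
        (if (a ≤ b ∧ ∀ c ∈ (t.take (b+1)).drop a, ((((t.take (b+1)).drop a).count c : ℕ) : Int) = (K:Int)) then (1:Int) else 0))
        = ∑ b ∈ Finset.Ico a t.length,
        (if (a ≤ b ∧ ∀ c ∈ (t.take (b+1)).drop a, ((((t.take (b+1)).drop a).count c : ℕ) : Int) = (K:Int)) then (1:Int) else 0) := by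
      refine (Finset.sum_subset ?_ ?_).symm
      · intro b hb
        rw [Finset.mem_Ico] at hb
        rw [Finset.mem_range]
        omega
      · intro b hb hnb
        rw [Finset.mem_range] at hb
        rw [Finset.mem_Ico] at hnb
        exact if_neg (fun hcon => hnb ⟨hcon.1, hb⟩)
    rw [h2, Finset.sum_Ico_eq_sum_range]
    refine Finset.sum_congr rfl ?_
    intro i _
    have hsub : (t.take (a + i + 1)).drop a = (t.drop a).take (i+1) := by
      rw [List.take_drop, show a + (i+1) = a + i + 1 from by omega]
    have hchkiff : (pvChkB (K:Int) ((t.drop a).take (i+1)) = true)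
        ↔ (a ≤ a + i ∧ ∀ c ∈ (t.take (a+i+1)).drop a, ((((t.take (a+i+1)).drop a).count c : ℕ) : Int) = (K:Int)) := by
      rw [hsub]
      constructor
      · intro h
        exact ⟨by omega, pvChkB_iff _ _ |>.mp h⟩
      · intro h
        exact (pvChkB_iff _ _).mpr h.2
    exact if_congr hchkiff rfl rfl
  rw [Finset.sum_congr rfl hstep1]
  rw [← Finset.sum_product']
  rw [Finset.sum_boole]
  rfl

lemma pvSU_zero (t : List Char) (u : Int) (hu : 1 ≤ u) : pvSU t 0 u = 0 := by
  unfold pvSU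
  refine Finset.sum_eq_zero ?_
  intro i _
  rw [if_neg]
  rw [mul_zero]
  rw [show (0:Int).toNat = 0 from rfl, pvSeg_w0, pvCnt_nil]
  omega

lemma pvChkB_zero (k : Int) (hk : k ≤ 0) (q : List Char) (hq : q ≠ []) : ¬ (pvChkB k q = true) := by
  intro h
  have hchk := (pvChkB_iff k q).mp h
  obtain ⟨c, hc⟩ := List.exists_mem_of_ne_nil q hq
  have := hchk c hc
  have hpos : 0 < q.count c := List.count_pos_iff.mpr hc
  omega

lemma pvPyRangeZero (n : ℕ) : PySem.List.pyRange 0 (n:Int) 1 = (List.range n).map (fun (k : ℕ) => (k:Int)) := by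
  rw [PySem.List.pyRange_zero_natCast]

lemma pvPyRangeOne (U : ℕ) : PySem.List.pyRange 1 ((U:Int)+1) 1 = (List.range U).map (fun j => ((j+1:ℕ):Int)) := by
  rw [PySem.List.pyRange_one]
  norm_num [← List.map_eq_flatMap, List.map_map]
  intro a _
  ring

lemma pvA_char (s : String) (count : Int) (hk : 0 ≤ count) :
    equalCountSubstrings3 s count
      = ∑ j ∈ Finset.range (s.toList.toFinset.card), pvSU s.toList count (((j+1:ℕ)):Int) := by
  have h0 : equalCountSubstrings3 s count
      = ((PySem.List.pyRange 1 ((((PySem.Set.ofList s.toList).length : ℕ) : Int) + 1) 1).foldl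
          (pvOuterA s.toList count) (some 0)).getD 0 := rfl
  rw [h0, pvPyRangeOne (PySem.Set.ofList s.toList).length]
  rw [pvA_list s.toList count hk _ (by
    intro u hu
    rw [List.mem_map] at hu
    obtain ⟨j, _, rfl⟩ := hu
    exact_mod_cast Nat.succ_le_succ (Nat.zero_le j)) 0]
  simp only [Option.getD_some, zero_add]
  rw [List.map_map, pvListSum, pvU_eq]
  rfl

lemma pvB_char (s : String) (count : Int) :
    equalCountSubstrings3_alt s count
      = ∑ a ∈ Finset.range s.toList.length, ∑ j ∈ Finset.range (s.toList.length - a),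
          (if pvChkB count ((s.toList.drop a).take (j+1)) = true then (1:Int) else 0) := by
  have h0 : equalCountSubstrings3_alt s count
      = (PySem.List.pyRange 0 ((s.toList.length : ℕ) : Int) 1).foldl
          (pvOuterB s.toList count) 0 := rfl
  have hpr := pvPyRangeZero s.toList.length
  have hbl := pvB_list s.toList count (List.range s.toList.length) 0
  rw [h0, hpr, hbl]
  simp only [zero_add]
  rw [pvListSum]

-- ===== VERDICT (by name: the statement is the Claim_ definition above) =====
theorem equalCountSubstrings3_spec : Claim_equal_equalCountSubstrings3 := by
  intro s count _ hpre
  unfold Spec_equalCountSubstrings3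
  by_cases hs : s = ""
  · subst hs
    rfl
  · have hk : 0 ≤ count := by
      rcases hpre with h | h
      · exact absurd h hs
      · exact h
    rw [pvA_char s count hk, pvB_char s count]
    by_cases hk0 : count = 0
    · subst hk0
      rw [Finset.sum_eq_zero (fun j _ => pvSU_zero s.toList _ (by exact_mod_cast Nat.succ_le_succ (Nat.zero_le j)))]
      refine (Finset.sum_eq_zero ?_).symm
      intro a ha
      refine Finset.sum_eq_zero ?_
      intro j hj
      rw [Finset.mem_range] at ha hj
      refine if_neg (pvChkB_zero 0 le_rfl _ ?_)
      apply List.ne_nil_of_length_pos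
      rw [List.length_take, List.length_drop]
      omega
    · have hk1 : 1 ≤ count := by omega
      obtain ⟨K, rfl⟩ : ∃ Kn : ℕ, count = (Kn:Int) := ⟨count.toNat, (Int.toNat_of_nonneg hk).symm⟩
      have hK1 : 1 ≤ K := by exact_mod_cast hk1
      rw [pvA_sum_eq_card s.toList K, pvB_sum_eq_card s.toList K, pvSA_card_eq s.toList K hK1]
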